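-- pv_equiv track=rewrite | github.com/bmpasini/CtCI-6th-Edition | chap-8/8.13.py | stack_of_boxes
-- ===== SOURCE A (Python) =====
-- def stack_of_boxes(boxes):
--     boxes = sorted(boxes, key=lambda x: x['height'], reverse=True)
--     max_height = 0
--     max_heights = [ None for _ in range(len(boxes)) ]
--     for i in range(len(boxes)):
--         height = _stack_of_boxes(boxes, i, max_heights)
--         max_height = max(height, max_height)
--     return max_height
--
-- def _stack_of_boxes(boxes, i, max_heights):
--     if max_heights[i] is not None:
--         return max_heights[i]
--     bottom = boxes[i]
--     max_height = 0
--     for j in range(i+1, len(boxes)):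
--         if meet_requirements(bottom, boxes[j]):
--             height = _stack_of_boxes(boxes, j, max_heights)
--             max_height = max(height, max_height)
--     max_height += bottom['height']
--     max_heights[i] = max_height
--     return max_height
--
-- def meet_requirements(bottom, top):
--     return bottom['height'] > top['height'] and \
--            bottom['width']  > top['width'] and \
--            bottom['depth']  > top['depth']
-- ===== SOURCE B (Python) =====
-- def stack_of_boxes(boxes):
--     bs = sorted(boxes, key=lambda x: x['height'], reverse=True)
--     return max([0] + _dp(bs))
--
-- def _dp(bs):
--     # dp list for the suffix: dp[k] = tallest stack with bs[k] at the bottom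
--     if not bs:
--         return []
--     rest = _dp(bs[1:])
--     head = bs[0]
--     best = 0
--     for top, h in zip(bs[1:], rest):
--         if meet_requirements(head, top):
--             best = max(best, h)
--     return [head['height'] + best] + rest
--
-- def meet_requirements(bottom, top):
--     return bottom['height'] > top['height'] and \
--            bottom['width']  > top['width'] and \
--            bottom['depth']  > top['depth']
-- ===== Notes on version B (the rewrite author's own statement) =====
-- stated objective: simpler
-- what changed: A's top-down memoized recursion over indices with a mutable max_heights table is replaced by a single structural recursion that builds the dp list of the height-sorted list back-to-front (dp[i] = height + best dominated dp value of the suffix) and returns max([0] + dp); Pre_ excludes inputs where A raises KeyError (a box missing 'height', or a strictly-compared pair missing 'width'/'depth') and boxes with duplicate keys, which a Python dict cannot represent.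
import Mathlib
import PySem

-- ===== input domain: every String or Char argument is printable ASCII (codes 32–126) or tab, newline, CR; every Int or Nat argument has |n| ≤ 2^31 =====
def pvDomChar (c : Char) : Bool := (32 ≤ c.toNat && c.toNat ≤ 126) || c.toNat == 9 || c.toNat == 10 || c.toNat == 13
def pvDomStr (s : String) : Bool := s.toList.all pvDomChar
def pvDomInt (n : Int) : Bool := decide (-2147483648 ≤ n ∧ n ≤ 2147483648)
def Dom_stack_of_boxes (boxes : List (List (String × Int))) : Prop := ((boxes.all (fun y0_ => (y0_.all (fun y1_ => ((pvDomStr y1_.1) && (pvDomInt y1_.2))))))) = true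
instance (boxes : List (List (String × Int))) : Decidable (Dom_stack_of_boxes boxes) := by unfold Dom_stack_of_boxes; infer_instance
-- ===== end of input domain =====

-- B replaces A's top-down memoized recursion (a mutable memo table threaded through
-- index-based recursive calls) by a single structural recursion building the dp list of
-- the sorted suffix back-to-front; objective: simpler (no memo table, no index recursion).

-- box['k'] for a Python dict rendered as an association list: first match (dicts have
-- unique keys); default 0 is exact under Pre_, which guarantees every accessed key exists.
def pvLookD (d : List (String × Int)) (k : String) : Int :=
  match d.find? (fun p => p.1 == k) with
  | some p => p.2
  | none => 0

-- meet_requirements, shared module helper of both A and B (short-circuit order preserved)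
def pvMeets (b t : List (String × Int)) : Bool :=
  decide (pvLookD b "height" > pvLookD t "height") &&
  (decide (pvLookD b "width" > pvLookD t "width") &&
   decide (pvLookD b "depth" > pvLookD t "depth"))

-- ===== PORT A =====
-- _stack_of_boxes: memo (max_heights) threaded as a List (Option Int); fuel only makes
-- the index recursion structurally terminating (calls go i → j > i, so fuel = length
-- at the top is never exhausted).
def stack_of_boxes_aux (bs : List (List (String × Int))) (fuel : Nat) (i : Nat)
    (memo : List (Option Int)) : Int × List (Option Int) :=
  match fuel with
  | 0 => (0, memo)  -- unreachable fuel guard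
  | fuel + 1 =>
    match memo.getD i none with
    | some v => (v, memo)
    | none =>
      let bottom := bs.getD i []
      let st := (List.range' (i + 1) (bs.length - (i + 1))).foldl
        (fun (st : Int × List (Option Int)) j =>
          if pvMeets bottom (bs.getD j []) then
            let r := stack_of_boxes_aux bs fuel j st.2
            (max r.1 st.1, r.2)
          else st) (0, memo)
      let mh := st.1 + pvLookD bottom "height"
      (mh, st.2.set i (some mh))

def stack_of_boxes (boxes : List (List (String × Int))) : Int :=
  let bs := PySem.List.sorted boxes (fun x => pvLookD x "height") true
  ((List.range bs.length).foldl
    (fun (st : Int × List (Option Int)) i =>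
      let r := stack_of_boxes_aux bs bs.length i st.2
      (max r.1 st.1, r.2))
    (0, List.replicate bs.length none)).1

-- ===== PORT B =====
-- _dp: dp list for a suffix of the sorted list, built back-to-front by structural recursion
def stack_of_boxes_dp : List (List (String × Int)) → List Int
  | [] => []
  | head :: tl =>
    let rest := stack_of_boxes_dp tl
    let best := (tl.zip rest).foldl
      (fun best p => if pvMeets head p.1 then max best p.2 else best) 0
    (pvLookD head "height" + best) :: rest

def stack_of_boxes_alt (boxes : List (List (String × Int))) : Int :=
  let bs := PySem.List.sorted boxes (fun x => pvLookD x "height") true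
  -- max([0] + dp): Python max scans keeping the current value, replacing on strict >
  (stack_of_boxes_dp bs).foldl (fun acc x => if x > acc then x else acc) 0

-- ===== PRECONDITION & SPEC =====
-- Pre_ excludes exactly the inputs where Python A raises — a box missing 'height'
-- (KeyError in the sort key) or a pair of boxes whose strict height/width comparisons
-- reach a missing 'width'/'depth' key — and boxes with duplicate keys, which a Python
-- dict cannot represent (first-vs-last lookup would be accidental).
def Pre_stack_of_boxes (boxes : List (List (String × Int))) : Prop :=
  (∀ b ∈ boxes, (b.map Prod.fst).Nodup ∧ b.any (fun p => p.1 == "height") = true) ∧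
  (∀ b ∈ boxes, ∀ t ∈ boxes,
    pvLookD b "height" > pvLookD t "height" →
      b.any (fun p => p.1 == "width") = true ∧ t.any (fun p => p.1 == "width") = true ∧
      (pvLookD b "width" > pvLookD t "width" →
        b.any (fun p => p.1 == "depth") = true ∧ t.any (fun p => p.1 == "depth") = true))
instance (boxes : List (List (String × Int))) : Decidable (Pre_stack_of_boxes boxes) := by
  unfold Pre_stack_of_boxes; infer_instance

def pvWitness_stack_of_boxes : (List (List (String × Int))) :=
  [[("height", 2), ("width", 2), ("depth", 2)], [("height", 1), ("width", 1), ("depth", 1)]]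

def Spec_stack_of_boxes (boxes : List (List (String × Int))) (out : Int) : Prop := out = stack_of_boxes_alt boxes
instance (boxes : List (List (String × Int))) (out : Int) : Decidable (Spec_stack_of_boxes boxes out) := by unfold Spec_stack_of_boxes; infer_instance

-- ===== CLAIM (what is proved, stated in full; the proofs are below) =====
def Claim_equal_stack_of_boxes : Prop := ∀ (boxes : List (List (String × Int))), Dom_stack_of_boxes boxes → Pre_stack_of_boxes boxes → Spec_stack_of_boxes boxes (stack_of_boxes boxes)

-- ===== LEMMAS AND PROOFS =====

-- dp value of the box at index i of the sorted list
def pvD (bs : List (List (String × Int))) (i : Nat) : Int :=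
  (stack_of_boxes_dp bs).getD i 0

lemma dp_length (bs : List (List (String × Int))) :
    (stack_of_boxes_dp bs).length = bs.length := by
  induction bs with
  | nil => rfl
  | cons h t ih => simp [stack_of_boxes_dp, ih]

lemma dp_drop (k : Nat) (bs : List (List (String × Int))) :
    stack_of_boxes_dp (bs.drop k) = (stack_of_boxes_dp bs).drop k := by
  induction k generalizing bs with
  | zero => simp
  | succ k ih =>
    cases bs with
    | nil => simp [stack_of_boxes_dp]
    | cons h t =>
      simp only [List.drop_succ_cons, ih t]
      simp [stack_of_boxes_dp]

-- index fold over range' k (n-k) on two equal-length lists = fold over the zipped suffixes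
lemma foldl_range'_zip {α β γ : Type} (dx : α) (dy : β)
    (g : α → β → γ → γ) :
    ∀ (m k : Nat) (xs : List α) (ys : List β) (b0 : γ), ys.length = xs.length → xs.length - k = m →
    (List.range' k m).foldl (fun b j => g (xs.getD j dx) (ys.getD j dy) b) b0
      = ((xs.drop k).zip (ys.drop k)).foldl (fun b p => g p.1 p.2 b) b0 := by
  intro m
  induction m with
  | zero =>
    intro k xs ys b0 hlen hm
    have hk : xs.length ≤ k := by omega
    have hk' : ys.length ≤ k := by omega
    simp [List.drop_eq_nil_of_le hk, List.drop_eq_nil_of_le hk']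
  | succ m ih =>
    intro k xs ys b0 hlen hm
    have hk : k < xs.length := by omega
    have hk' : k < ys.length := by omega
    rw [List.range'_succ, ← List.getElem_cons_drop hk, ← List.getElem_cons_drop hk']
    simp only [List.zip_cons_cons, List.foldl_cons,
      List.getD_eq_getElem xs dx hk, List.getD_eq_getElem ys dy hk']
    exact ih (k + 1) xs ys _ hlen (by omega)

lemma getD_set_cases (l : List (Option Int)) (i k : Nat) (a : Option Int) :
    (l.set i a).getD k none = if i = k ∧ i < l.length then a else l.getD k none := by
  simp only [List.getD, List.getElem?_set]
  split_ifs <;> first | rfl | (simp_all; omega) | simp_all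

-- characterization of pvD by the index recurrence of A
lemma pvD_char (bs : List (List (String × Int))) (i : Nat) (hi : i < bs.length) :
    pvD bs i = (List.range' (i + 1) (bs.length - (i + 1))).foldl
        (fun b j => if pvMeets (bs.getD i []) (bs.getD j []) then max (pvD bs j) b else b) 0
      + pvLookD (bs.getD i []) "height" := by
  have hlen := dp_length bs
  have hi' : i < (stack_of_boxes_dp bs).length := by omega
  have hd : bs.drop i = bs.getD i [] :: bs.drop (i + 1) := by
    rw [List.getD_eq_getElem bs [] hi]
    exact (List.getElem_cons_drop hi).symm
  have hdp := (dp_drop i bs).symm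
  rw [hd] at hdp
  have h0 : ((stack_of_boxes_dp bs).drop i)[0]'(by simp; omega) = (stack_of_boxes_dp bs)[i]'hi' := by
    simp
  have hv : (stack_of_boxes_dp bs)[i]'hi'
      = pvLookD (bs.getD i []) "height"
        + ((bs.drop (i + 1)).zip (stack_of_boxes_dp (bs.drop (i + 1)))).foldl
            (fun best p => if pvMeets (bs.getD i []) p.1 then max best p.2 else best) 0 := by
    rw [← h0]
    simp only [hdp]
    simp [stack_of_boxes_dp]
  simp only [pvD]
  rw [List.getD_eq_getElem _ _ hi', hv, dp_drop]
  rw [foldl_range'_zip [] 0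
      (fun x y b => if pvMeets (bs.getD i []) x then max y b else b)
      (bs.length - (i + 1)) (i + 1) bs (stack_of_boxes_dp bs) 0 hlen rfl]
  have hfun : (fun (b : Int) (p : List (String × Int) × Int) =>
        if pvMeets (bs.getD i []) p.1 then max p.2 b else b)
      = (fun b p => if pvMeets (bs.getD i []) p.1 then max b p.2 else b) := by
    funext b p
    by_cases h : pvMeets (bs.getD i []) p.1 <;> simp [max_comm]
  rw [hfun, add_comm]

-- A's memoized recursion computes pvD and preserves memo consistency
lemma aux_correct (bs : List (List (String × Int))) :
    ∀ (fuel i : Nat) (memo : List (Option Int)),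
      bs.length - i ≤ fuel → i < bs.length →
      (∀ k v, memo.getD k none = some v → v = pvD bs k) →
      (stack_of_boxes_aux bs fuel i memo).1 = pvD bs i ∧
      (∀ k v, (stack_of_boxes_aux bs fuel i memo).2.getD k none = some v → v = pvD bs k) := by
  intro fuel
  induction fuel with
  | zero => intro i memo hfuel hi _; omega
  | succ fuel ih =>
    intro i memo hfuel hi hinv
    simp only [stack_of_boxes_aux]
    cases hmi : memo.getD i none with
    | some v =>
      exact ⟨hinv i v hmi, hinv⟩
    | none =>
      have key : ∀ (L : List Nat) (st : Int × List (Option Int)),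
          (∀ j ∈ L, i < j ∧ j < bs.length) →
          (∀ k v, st.2.getD k none = some v → v = pvD bs k) →
          (L.foldl (fun (st : Int × List (Option Int)) j =>
              if pvMeets (bs.getD i []) (bs.getD j []) then
                let r := stack_of_boxes_aux bs fuel j st.2
                (max r.1 st.1, r.2)
              else st) st).1
            = L.foldl (fun b j =>
                if pvMeets (bs.getD i []) (bs.getD j []) then max (pvD bs j) b else b) st.1 ∧
          (∀ k v, (L.foldl (fun (st : Int × List (Option Int)) j =>
              if pvMeets (bs.getD i []) (bs.getD j []) then
                let r := stack_of_boxes_aux bs fuel j st.2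
                (max r.1 st.1, r.2)
              else st) st).2.getD k none = some v → v = pvD bs k) := by
        intro L
        induction L with
        | nil => intro st _ hst; exact ⟨rfl, hst⟩
        | cons j L ihL =>
          intro st hmem hst
          have hj := hmem j (by simp)
          by_cases hc : pvMeets (bs.getD i []) (bs.getD j []) = true
          · simp only [List.foldl_cons, hc, if_true]
            have haux := ih j st.2 (by omega) hj.2 hst
            have hrec := ihL (max (stack_of_boxes_aux bs fuel j st.2).1 st.1,
                (stack_of_boxes_aux bs fuel j st.2).2)
              (fun j' hj' => hmem j' (by simp [hj'])) haux.2
            rw [← haux.1]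
            exact hrec
          · simp only [List.foldl_cons, hc]
            exact ihL st (fun j' hj' => hmem j' (by simp [hj'])) hst
      have hmem : ∀ j ∈ List.range' (i + 1) (bs.length - (i + 1)), i < j ∧ j < bs.length := by
        intro j hj
        rw [List.mem_range'_1] at hj
        omega
      have hk := key (List.range' (i + 1) (bs.length - (i + 1))) (0, memo) hmem hinv
      constructor
      · show _ = pvD bs i
        rw [pvD_char bs i hi]
        exact congrArg (· + pvLookD (bs.getD i []) "height") hk.1
      · intro k v hkv
        rw [getD_set_cases] at hkv
        split_ifs at hkv with hcase
        · obtain ⟨hik, _⟩ := hcase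
          subst hik
          injection hkv with hkv
          rw [← hkv, pvD_char bs i hi]
          exact congrArg (· + pvLookD (bs.getD i []) "height") hk.1
        · exact hk.2 k v hkv

-- fold of max over all indices = fold of max over the dp list
lemma foldl_range_getD (l : List Int) (f : Int → Int → Int) (a0 : Int) :
    (List.range l.length).foldl (fun a i => f a (l.getD i 0)) a0 = l.foldl f a0 := by
  rw [List.range_eq_range']
  rw [foldl_range'_zip 0 0 (fun x _ b => f b x) l.length 0 l l a0 rfl (by omega)]
  simp only [List.drop_zero]
  induction l generalizing a0 with
  | nil => rfl
  | cons x t iht => simp only [List.zip_cons_cons, List.foldl_cons]; exact iht (f a0 x)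

-- A's whole body equals B's whole body on the (shared) sorted list
lemma bodies_eq (bs : List (List (String × Int))) :
    ((List.range bs.length).foldl
        (fun (st : Int × List (Option Int)) i =>
          let r := stack_of_boxes_aux bs bs.length i st.2
          (max r.1 st.1, r.2))
        (0, List.replicate bs.length none)).1
      = (stack_of_boxes_dp bs).foldl (fun acc x => if x > acc then x else acc) 0 := by
  have hout : ∀ (L : List Nat) (st : Int × List (Option Int)),
      (∀ i ∈ L, i < bs.length) →
      (∀ k v, st.2.getD k none = some v → v = pvD bs k) →
      (L.foldl (fun (st : Int × List (Option Int)) i =>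
          let r := stack_of_boxes_aux bs bs.length i st.2
          (max r.1 st.1, r.2)) st).1
        = L.foldl (fun a i => max (pvD bs i) a) st.1 := by
    intro L
    induction L with
    | nil => intro st _ _; rfl
    | cons i L ihL =>
      intro st hmem hst
      have haux := aux_correct bs bs.length i st.2 (by omega) (hmem i (by simp)) hst
      simp only [List.foldl_cons]
      rw [← haux.1]
      exact ihL _ (fun j hj => hmem j (by simp [hj])) haux.2
  have hinit : ∀ k v,
      (List.replicate bs.length (none : Option Int)).getD k none = some v → v = pvD bs k := by
    intro k v h
    simp only [List.getD, List.getElem?_replicate] at h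
    split at h <;> simp_all
  rw [hout (List.range bs.length) (0, List.replicate bs.length none)
      (fun i hi => List.mem_range.mp hi) hinit]
  simp only [pvD]
  rw [← dp_length bs]
  rw [foldl_range_getD (stack_of_boxes_dp bs) (fun a x => max x a) 0]
  congr 1
  funext a x
  rcases lt_or_ge a x with h | h
  · rw [if_pos h, max_eq_left h.le]
  · rw [if_neg (not_lt.mpr h), max_eq_right h]

-- ===== VERDICT (by name: the statement is the Claim_ definition above) =====
theorem stack_of_boxes_spec : Claim_equal_stack_of_boxes := by
  intro boxes _ _
  unfold Spec_stack_of_boxes stack_of_boxes stack_of_boxes_alt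
  exact bodies_eq (PySem.List.sorted boxes (fun x => pvLookD x "height") true)
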